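-- pv_equiv track=rewrite | github.com/bwang1008/AdventOfCode2023 | day21A.py | get_positions_n_away
-- ===== SOURCE A (Python) =====
-- from typing import List, Set, Tuple
--
-- GARDEN_PLOT: str = "."
--
-- def valid(board: List[List[str]], row: int, col: int) -> bool:
--     return (
--         0 <= row < len(board)
--         and 0 <= col < len(board[row])
--         and board[row][col] == GARDEN_PLOT
--     )
--
-- def get_positions_n_away(
--     board: List[List[str]], start_pos: Tuple[int, int], n: int
-- ) -> Set[Tuple[int, int]]:
--     zero_away: Set[Tuple[int, int]] = {start_pos}
--     k_away = zero_away
--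
--     dx: List[int] = [-1, 0, 1, 0]
--     dy: List[int] = [0, 1, 0, -1]
--
--     for k in range(n):
--         k_plus_1_away: Set[Tuple[int, int]] = set()
--
--         for pos in k_away:
--             for i in range(len(dx)):
--                 row2: int = pos[0] + dx[i]
--                 col2: int = pos[1] + dy[i]
--
--                 if valid(board, row2, col2):
--                     k_plus_1_away.add((row2, col2))
--
--         k_away = k_plus_1_away
--
--         #  logger.debug(f'After {k + 1} steps, can get to {k_away}')
--
--     return k_away
-- ===== SOURCE B (Python) =====
-- GARDEN_PLOT: str = "."
--
--
-- def _step(board, frontier):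
--     """One BFS layer: distinct valid neighbours of frontier, in first-seen order."""
--     nxt = []
--     seen = set()
--     for r, c in frontier:
--         for r2, c2 in ((r - 1, c), (r, c + 1), (r + 1, c), (r, c - 1)):
--             if (
--                 (r2, c2) not in seen
--                 and 0 <= r2 < len(board)
--                 and 0 <= c2 < len(board[r2])
--                 and board[r2][c2] == GARDEN_PLOT
--             ):
--                 seen.add((r2, c2))
--                 nxt.append((r2, c2))
--     return nxt
--
--
-- def get_positions_n_away(board, start_pos, n):
--     # Iterate the layer map, but stop as soon as the layer sequence repeats with
--     # period 1 or 2 (which it does after at most O(rows*cols) steps) and jump to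
--     # the answer by parity instead of blindly looping n times.
--     prev = None
--     cur = [start_pos]
--     k = 0
--     while k < n:
--         nxt = _step(board, cur)
--         k += 1
--         if nxt == cur:
--             return set(nxt)
--         if nxt == prev:
--             return set(nxt if (n - k) % 2 == 0 else cur)
--         prev, cur = cur, nxt
--     return set(cur)
-- ===== Notes on version B (the rewrite author's own statement) =====
-- stated objective: faster
-- what changed: Instead of blindly applying the neighbour-layer map n times, B iterates it with period-1/2 cycle detection (the layer sequence becomes 2-periodic after at most O(rows*cols) steps) and jumps to the answer by the parity of the remaining steps.
import Mathlib
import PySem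

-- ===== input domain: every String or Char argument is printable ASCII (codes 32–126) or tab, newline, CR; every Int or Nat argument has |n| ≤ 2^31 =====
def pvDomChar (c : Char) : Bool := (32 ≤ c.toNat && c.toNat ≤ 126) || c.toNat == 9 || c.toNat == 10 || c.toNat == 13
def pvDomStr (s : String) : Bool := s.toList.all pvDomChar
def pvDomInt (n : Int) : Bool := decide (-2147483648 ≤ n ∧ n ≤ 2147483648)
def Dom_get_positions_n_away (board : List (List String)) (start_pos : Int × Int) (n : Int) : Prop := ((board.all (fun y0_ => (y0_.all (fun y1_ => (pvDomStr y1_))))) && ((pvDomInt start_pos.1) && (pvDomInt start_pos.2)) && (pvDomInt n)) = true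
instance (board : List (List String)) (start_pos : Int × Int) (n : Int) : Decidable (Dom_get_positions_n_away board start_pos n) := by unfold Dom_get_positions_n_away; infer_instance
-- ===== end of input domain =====

-- ===== PORT A =====
-- B replaces the blind n-step iteration by the same layer map with period-1/2 cycle
-- detection and a parity jump (objective: faster for large n; return value only).

-- helper `valid` of A; board[row]/board[row][col] accessed only under the bound
-- checks, so pyGetD with a default is exact here
def pvValidA (board : List (List String)) (row col : Int) : Bool :=
  decide (0 ≤ row) && decide (row < (board.length : Int)) &&
    (let brow := PySem.List.pyGetD board row []
     decide (0 ≤ col) && decide (col < (brow.length : Int)) &&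
       (PySem.List.pyGetD brow col "" == "."))

def get_positions_n_away (board : List (List String)) (start_pos : Int × Int) (n : Int) : List (Int × Int) :=
  let zero_away : PySem.Set (Int × Int) := PySem.Set.ofList [start_pos]
  let dx : List Int := [-1, 0, 1, 0]
  let dy : List Int := [0, 1, 0, -1]
  (PySem.List.pyRange 0 n 1).foldl (fun k_away _ =>
    k_away.foldl (fun acc pos =>
      (PySem.List.pyRange 0 ((dx.length : Nat) : Int) 1).foldl (fun acc2 i =>
        let row2 : Int := pos.1 + PySem.List.pyGetD dx i 0
        let col2 : Int := pos.2 + PySem.List.pyGetD dy i 0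
        if pvValidA board row2 col2 then PySem.Set.add acc2 (row2, col2) else acc2)
        acc)
      PySem.Set.empty)
    zero_away

-- ===== PORT B =====
def pvOpenB (board : List (List String)) (r c : Int) : Bool :=
  decide (0 ≤ r ∧ r < (board.length : Int)) &&
    (let row := PySem.List.pyGetD board r []
     decide (0 ≤ c ∧ c < (row.length : Int)) &&
       (PySem.List.pyGetD row c "" == "."))

-- `_step` of Source B: the seen-set/append pair is exactly PySem.Set.add
def pvStepB (board : List (List String)) (frontier : List (Int × Int)) : List (Int × Int) :=
  frontier.foldl (fun acc p =>
    [(p.1 - 1, p.2), (p.1, p.2 + 1), (p.1 + 1, p.2), (p.1, p.2 - 1)].foldl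
      (fun acc2 q => if pvOpenB board q.1 q.2 then PySem.Set.add acc2 q else acc2)
      acc)
    PySem.Set.empty

-- the while-loop of Source B; fuel = number of steps still to take (n - k)
def pvLoopB (board : List (List String)) (prev : Option (List (Int × Int)))
    (cur : List (Int × Int)) : Nat → List (Int × Int)
  | 0 => cur
  | fuel + 1 =>
    let nxt := pvStepB board cur
    if nxt == cur then nxt
    else if prev == some nxt then (if fuel % 2 == 0 then nxt else cur)
    else pvLoopB board (some cur) nxt fuel

def get_positions_n_away_alt (board : List (List String)) (start_pos : Int × Int) (n : Int) : List (Int × Int) :=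
  pvLoopB board none (PySem.Set.ofList [start_pos]) n.toNat

-- ===== PRECONDITION & SPEC =====
def Spec_get_positions_n_away (board : List (List String)) (start_pos : Int × Int) (n : Int) (out : List (Int × Int)) : Prop := out = get_positions_n_away_alt board start_pos n
instance (board : List (List String)) (start_pos : Int × Int) (n : Int) (out : List (Int × Int)) : Decidable (Spec_get_positions_n_away board start_pos n out) := by unfold Spec_get_positions_n_away; infer_instance

-- ===== CLAIM (what is proved, stated in full; the proofs are below) =====
def Claim_equal_get_positions_n_away : Prop := ∀ (board : List (List String)) (start_pos : Int × Int) (n : Int), Dom_get_positions_n_away board start_pos n → Spec_get_positions_n_away board start_pos n (get_positions_n_away board start_pos n)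

-- ===== LEMMAS AND PROOFS =====

-- the two validity tests agree
theorem pvValidA_eq_pvOpenB (board : List (List String)) (r c : Int) :
    pvValidA board r c = pvOpenB board r c := by
  simp [pvValidA, pvOpenB, Bool.and_assoc]

-- A's layer body is B's step function
theorem stepA_eq (board : List (List String)) (s : List (Int × Int)) :
    s.foldl (fun acc pos =>
      (PySem.List.pyRange 0 (4 : Int) 1).foldl (fun acc2 i =>
        let row2 : Int := pos.1 + PySem.List.pyGetD [-1, 0, 1, 0] i 0
        let col2 : Int := pos.2 + PySem.List.pyGetD [0, 1, 0, -1] i 0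
        if pvValidA board row2 col2 then PySem.Set.add acc2 (row2, col2) else acc2)
        acc)
      PySem.Set.empty = pvStepB board s := by
  unfold pvStepB
  congr 1
  funext acc pos
  have h4 : PySem.List.pyRange 0 (4 : Int) 1 = [0, 1, 2, 3] := by decide
  simp [h4, List.foldl, pvValidA_eq_pvOpenB, PySem.List.pyGetD, sub_eq_add_neg]

-- a fold that ignores its elements is function iteration
theorem foldl_const_iterate {α β : Type} (f : α → α) :
    ∀ (l : List β) (z : α), l.foldl (fun s _ => f s) z = f^[l.length] z := by
  intro l
  induction l with
  | nil => intro z; rfl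
  | cons x xs ih =>
      intro z
      simp [List.foldl, ih, Function.iterate_succ_apply]

-- iterating along a 2-cycle
theorem iterate_two_cycle {α : Type} (f : α → α) (c p : α)
    (hc : f c = p) (hp : f p = c) :
    ∀ j, f^[j] c = (if j % 2 = 0 then c else p) ∧ f^[j] p = (if j % 2 = 0 then p else c) := by
  intro j
  induction j with
  | zero => simp
  | succ j ih =>
      obtain ⟨ih1, ih2⟩ := ih
      constructor
      · rw [Function.iterate_succ_apply, hc, ih2]
        rcases Nat.even_or_odd j with h | h
        · have h0 : j % 2 = 0 := Nat.even_iff.mp h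
          have h1 : (j + 1) % 2 = 1 := by omega
          simp [h0, h1]
        · have h0 : j % 2 = 1 := Nat.odd_iff.mp h
          have h1 : (j + 1) % 2 = 0 := by omega
          simp [h0, h1]
      · rw [Function.iterate_succ_apply, hp, ih1]
        rcases Nat.even_or_odd j with h | h
        · have h0 : j % 2 = 0 := Nat.even_iff.mp h
          have h1 : (j + 1) % 2 = 1 := by omega
          simp [h0, h1]
        · have h0 : j % 2 = 1 := Nat.odd_iff.mp h
          have h1 : (j + 1) % 2 = 0 := by omega
          simp [h0, h1]

-- the early-exit loop computes exactly the fuel-fold of the step map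
theorem loopB_eq (board : List (List String)) :
    ∀ (fuel : Nat) (cur : List (Int × Int)) (prev : Option (List (Int × Int))),
      (∀ p, prev = some p → pvStepB board p = cur) →
      pvLoopB board prev cur fuel = (pvStepB board)^[fuel] cur := by
  intro fuel
  induction fuel with
  | zero => intro cur prev _; rfl
  | succ fuel ih =>
      intro cur prev hprev
      rw [pvLoopB]
      by_cases hfix : pvStepB board cur = cur
      · simp only [hfix, BEq.rfl, if_true]
        rw [Function.iterate_fixed hfix]
      · have hne : (pvStepB board cur == cur) = false := by
          simp [beq_eq_false_iff_ne, hfix]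
        simp only [hne, Bool.false_eq_true, if_false]
        by_cases hcyc : prev = some (pvStepB board cur)
        · have hpc : pvStepB board (pvStepB board cur) = cur := hprev _ hcyc
          have hbeq : (prev == some (pvStepB board cur)) = true := by
            simp [hcyc]
          simp only [hbeq, if_true]
          rw [Function.iterate_succ_apply]
          have := (iterate_two_cycle (pvStepB board) (pvStepB board cur) cur hpc rfl fuel).1
          rw [this]
          by_cases hpar : fuel % 2 = 0
          · simp [hpar]
          · have : (fuel % 2 == 0) = false := by simp [hpar]
            simp [hpar, this]
        · have hbeq : (prev == some (pvStepB board cur)) = false := by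
            cases prev with
            | none => rfl
            | some q =>
                have : q ≠ pvStepB board cur := fun h => hcyc (by rw [h])
                simp [this]
          simp only [hbeq, Bool.false_eq_true, if_false]
          rw [ih (pvStepB board cur) (some cur) (fun p hp => by cases hp; rfl)]
          rw [← Function.iterate_succ_apply]

-- A in closed form: n.toNat iterations of the step map
theorem portA_eq_iterate (board : List (List String)) (start_pos : Int × Int) (n : Int) :
    get_positions_n_away board start_pos n
      = (pvStepB board)^[n.toNat] (PySem.Set.ofList [start_pos]) := by
  have hfun : (fun (k_away : List (Int × Int)) (_ : Int) =>
      k_away.foldl (fun acc pos =>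
        (PySem.List.pyRange 0 (4 : Int) 1).foldl (fun acc2 i =>
          let row2 : Int := pos.1 + PySem.List.pyGetD [-1, 0, 1, 0] i 0
          let col2 : Int := pos.2 + PySem.List.pyGetD [0, 1, 0, -1] i 0
          if pvValidA board row2 col2 then PySem.Set.add acc2 (row2, col2) else acc2)
          acc)
        PySem.Set.empty)
      = (fun (k_away : List (Int × Int)) (_ : Int) => pvStepB board k_away) :=
    funext fun s => funext fun _ => stepA_eq board s
  have key : get_positions_n_away board start_pos n
      = (PySem.List.pyRange 0 n 1).foldl (fun k_away _ => pvStepB board k_away)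
          (PySem.Set.ofList [start_pos]) := by
    unfold get_positions_n_away
    exact congrArg (fun f => List.foldl f (PySem.Set.ofList [start_pos]) (PySem.List.pyRange 0 n 1)) hfun
  rw [key, foldl_const_iterate, PySem.List.length_pyRange_one]
  norm_num

-- ===== VERDICT (by name: the statement is the Claim_ definition above) =====
theorem get_positions_n_away_spec : Claim_equal_get_positions_n_away := by
  intro board start_pos n _
  unfold Spec_get_positions_n_away get_positions_n_away_alt
  rw [portA_eq_iterate, loopB_eq board n.toNat _ none (fun p hp => by cases hp)]
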